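-- pv_equiv track=rewrite | github.com/otiai10/botw | skel/procedure/task.py | rebuild_tasks
-- ===== SOURCE A (Python) =====
-- def rebuild_tasks(cur, given):
--   done_list     = []
--   notfound_list = []
--   for gv in given:
--     if gv in cur:
--       done_list.append(gv)
--       while cur.count(gv):
--         cur.remove(gv)
--     else:
--       notfound_list.append(gv)
--   return (done_list, notfound_list, cur)
-- ===== SOURCE B (Python) =====
-- def rebuild_tasks(cur, given):
--   done_list     = []
--   notfound_list = []
--   avail = set(cur)
--   for gv in given:
--     if gv in avail:
--       done_list.append(gv)
--       avail.discard(gv)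
--     else:
--       notfound_list.append(gv)
--   done_set = set(done_list)
--   cur[:] = [c for c in cur if c not in done_set]
--   return (done_list, notfound_list, cur)
-- ===== Notes on version B (the rewrite author's own statement) =====
-- stated objective: faster
-- what changed: Replaces A's per-element list scans (in, count, remove inside the loop) by a classify pass over given using a set built from cur, followed by a single filter pass rebuilding cur, turning quadratic scanning into two linear passes.
import Mathlib
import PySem

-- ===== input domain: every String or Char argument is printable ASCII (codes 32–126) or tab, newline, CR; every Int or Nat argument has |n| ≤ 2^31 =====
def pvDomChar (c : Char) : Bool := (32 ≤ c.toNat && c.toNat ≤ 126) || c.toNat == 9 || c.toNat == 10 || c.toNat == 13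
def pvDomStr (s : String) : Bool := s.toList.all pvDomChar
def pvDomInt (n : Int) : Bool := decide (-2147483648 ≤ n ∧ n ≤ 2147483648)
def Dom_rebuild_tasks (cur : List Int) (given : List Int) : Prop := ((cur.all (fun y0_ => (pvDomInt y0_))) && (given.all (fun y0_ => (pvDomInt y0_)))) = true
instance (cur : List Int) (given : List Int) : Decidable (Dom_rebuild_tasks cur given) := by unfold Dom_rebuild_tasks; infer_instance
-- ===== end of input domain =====

-- B replaces A's in-loop list scans (in / count / remove) by a set-based classify pass over
-- `given` followed by one filter pass rebuilding `cur` (both mutate `cur` in place in Python;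
-- the equivalence proved here is about the returned triple).

-- ===== PORT A =====
-- termination fact for the `while cur.count(gv): cur.remove(gv)` loop (cited by whileRemove)
theorem pvRemove_len_lt (gv : Int) (c : List Int) (h : PySem.List.count c gv ≠ 0) :
    ((PySem.List.remove? c gv).getD c).length < c.length := by
  have hm : gv ∈ c := by
    simpa [PySem.List.count, List.count_pos_iff] using Nat.pos_of_ne_zero h
  rw [PySem.List.remove?_eq_some_erase c gv hm]
  have h1 := List.length_erase_of_mem hm
  have h2 : 0 < c.length := List.length_pos_of_mem hm
  simp only [Option.getD_some]
  omega

-- `while cur.count(gv): cur.remove(gv)`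
def whileRemove (gv : Int) (c : List Int) : List Int :=
  if _h : PySem.List.count c gv ≠ 0 then
    whileRemove gv ((PySem.List.remove? c gv).getD c)
  else c
  termination_by c.length
  decreasing_by exact pvRemove_len_lt gv c _h

-- the body of A's `for gv in given` loop; state = (done_list, notfound_list, cur)
def stepA (s : List Int × List Int × List Int) (gv : Int) : List Int × List Int × List Int :=
  if gv ∈ s.2.2 then (s.1 ++ [gv], s.2.1, whileRemove gv s.2.2)
  else (s.1, s.2.1 ++ [gv], s.2.2)

def rebuild_tasks (cur : List Int) (given : List Int) : List Int × List Int × List Int :=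
  let r := given.foldl stepA ([], [], cur)
  (r.1, r.2.1, r.2.2)

-- ===== PORT B =====
-- the body of B's classify loop; state = (done_list, notfound_list, avail : set)
def stepB (s : List Int × List Int × PySem.Set Int) (gv : Int) : List Int × List Int × PySem.Set Int :=
  if PySem.Set.contains s.2.2 gv then (s.1 ++ [gv], s.2.1, PySem.Set.discard s.2.2 gv)
  else (s.1, s.2.1 ++ [gv], s.2.2)

def rebuild_tasks_alt (cur : List Int) (given : List Int) : List Int × List Int × List Int :=
  let r := given.foldl stepB ([], [], PySem.Set.ofList cur)
  let doneSet : PySem.Set Int := PySem.Set.ofList r.1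
  (r.1, r.2.1, cur.filter (fun c => !(PySem.Set.contains doneSet c)))

-- ===== PRECONDITION & SPEC =====
def Spec_rebuild_tasks (cur : List Int) (given : List Int) (out : List Int × List Int × List Int) : Prop := out = rebuild_tasks_alt cur given
instance (cur : List Int) (given : List Int) (out : List Int × List Int × List Int) : Decidable (Spec_rebuild_tasks cur given out) := by unfold Spec_rebuild_tasks; infer_instance

-- ===== CLAIM (what is proved, stated in full; the proofs are below) =====
def Claim_equal_rebuild_tasks : Prop := ∀ (cur : List Int) (given : List Int), Dom_rebuild_tasks cur given → Spec_rebuild_tasks cur given (rebuild_tasks cur given)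

-- ===== LEMMAS AND PROOFS =====

theorem filter_erase_self (gv : Int) (c : List Int) :
    (c.erase gv).filter (fun x => x != gv) = c.filter (fun x => x != gv) := by
  induction c with
  | nil => rfl
  | cons x xs ih =>
    by_cases hx : x = gv
    · subst hx; simp
    · simp [hx, ih, bne_iff_ne]

theorem whileRemove_eq_filter (gv : Int) (c : List Int) :
    whileRemove gv c = c.filter (fun x => x != gv) := by
  generalize hn : c.length = n
  induction n using Nat.strong_induction_on generalizing c with
  | _ n ih =>
    rw [whileRemove]
    by_cases h : PySem.List.count c gv ≠ 0
    · have hm : gv ∈ c := by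
        simpa [PySem.List.count, List.count_pos_iff] using Nat.pos_of_ne_zero h
      have hlt : ((PySem.List.remove? c gv).getD c).length < n := hn ▸ pvRemove_len_lt gv c h
      rw [dif_pos h, ih _ hlt _ rfl, PySem.List.remove?_eq_some_erase c gv hm]
      simpa using filter_erase_self gv c
    · rw [dif_neg h]
      have hnm : gv ∉ c := by
        simp [PySem.List.count] at h
        simpa [List.count_eq_zero] using h
      exact (List.filter_eq_self.mpr (fun x hx => by simp [bne_iff_ne]; rintro rfl; exact hnm hx)).symm

-- A's done_list only grows
theorem doneA_ext (given : List Int) : ∀ (d n c : List Int),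
    ∃ t, (given.foldl stepA (d, n, c)).1 = d ++ t := by
  induction given with
  | nil => intro d n c; exact ⟨[], by simp⟩
  | cons g gs ih =>
    intro d n c
    by_cases hg : g ∈ c
    · obtain ⟨t, ht⟩ := ih (d ++ [g]) n (whileRemove g c)
      exact ⟨[g] ++ t, by simpa [List.foldl_cons, stepA, hg, List.append_assoc] using ht⟩
    · obtain ⟨t, ht⟩ := ih d (n ++ [g]) c
      exact ⟨t, by simpa [List.foldl_cons, stepA, hg] using ht⟩

theorem main_inv (given : List Int) : ∀ (d n c : List Int) (s : PySem.Set Int),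
    (∀ x, x ∈ s ↔ x ∈ c) → (∀ x ∈ d, x ∉ c) →
    (given.foldl stepA (d, n, c)).1 = (given.foldl stepB (d, n, s)).1 ∧
    (given.foldl stepA (d, n, c)).2.1 = (given.foldl stepB (d, n, s)).2.1 ∧
    (given.foldl stepA (d, n, c)).2.2
      = c.filter (fun x => !((given.foldl stepA (d, n, c)).1.contains x)) := by
  induction given with
  | nil =>
    intro d n c s hs hd
    refine ⟨rfl, rfl, ?_⟩
    simp only [List.foldl_nil]
    exact (List.filter_eq_self.mpr (fun x hx => by
      simp only [Bool.not_eq_eq_eq_not, Bool.not_true, List.contains_eq_mem, decide_eq_false_iff_not]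
      exact fun hxd => hd x hxd hx)).symm
  | cons g gs ih =>
    intro d n c s hs hd
    by_cases hg : g ∈ c
    · have hgs : g ∈ s := (hs g).mpr hg
      have hs' : ∀ x, x ∈ PySem.Set.discard s g ↔ x ∈ c.filter (fun x => x != g) := by
        intro x
        rw [PySem.Set.mem_discard, List.mem_filter, hs]
        simp [bne_iff_ne, and_comm]
      have hd' : ∀ x ∈ d ++ [g], x ∉ c.filter (fun x => x != g) := by
        intro x hx hxc
        rcases List.mem_append.mp hx with h | h
        · exact hd x h (List.mem_filter.mp hxc).1
        · have : x = g := by simpa using h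
          subst this
          simpa using (List.mem_filter.mp hxc).2
      obtain ⟨h1, h2, h3⟩ := ih (d ++ [g]) n (c.filter (fun x => x != g)) (PySem.Set.discard s g) hs' hd'
      have hstepA : stepA (d, n, c) g = (d ++ [g], n, c.filter (fun x => x != g)) := by
        simp [stepA, hg, whileRemove_eq_filter]
      have hstepB : stepB (d, n, s) g = (d ++ [g], n, PySem.Set.discard s g) := by
        simp [stepB, hgs]
      refine ⟨by simp [List.foldl_cons, hstepA, hstepB, h1],
              by simp [List.foldl_cons, hstepA, hstepB, h2], ?_⟩
      simp only [List.foldl_cons, hstepA]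
      rw [h3, List.filter_filter]
      obtain ⟨t, ht⟩ := doneA_ext gs (d ++ [g]) n (c.filter (fun x => x != g))
      have hgD : g ∈ (gs.foldl stepA (d ++ [g], n, c.filter (fun x => x != g))).1 := by
        rw [ht]; simp
      refine List.filter_congr (fun x _ => ?_)
      by_cases hxg : x = g
      · subst hxg
        simp [List.contains_eq_mem, hgD]
      · simp [bne_iff_ne, hxg]
    · have hgs : g ∉ s := fun h => hg ((hs g).mp h)
      have hstepA : stepA (d, n, c) g = (d, n ++ [g], c) := by simp [stepA, hg]
      have hstepB : stepB (d, n, s) g = (d, n ++ [g], s) := by simp [stepB, hgs]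
      obtain ⟨h1, h2, h3⟩ := ih d (n ++ [g]) c s hs hd
      exact ⟨by simp [List.foldl_cons, hstepA, hstepB, h1],
             by simp [List.foldl_cons, hstepA, hstepB, h2],
             by simp [List.foldl_cons, hstepA, h3]⟩

-- ===== VERDICT (by name: the statement is the Claim_ definition above) =====
theorem rebuild_tasks_spec : Claim_equal_rebuild_tasks := by
  intro cur given _
  unfold Spec_rebuild_tasks rebuild_tasks rebuild_tasks_alt
  obtain ⟨h1, h2, h3⟩ := main_inv given [] [] cur (PySem.Set.ofList cur)
    (fun x => PySem.Set.mem_ofList cur x) (by simp)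
  refine Prod.ext h1 (Prod.ext h2 ?_)
  simp only [h3, h1]
  refine List.filter_congr (fun x _ => ?_)
  congr 1
  rw [List.contains_eq_mem, Bool.eq_iff_iff]
  rw [PySem.Set.contains_iff, PySem.Set.mem_ofList]
  simp
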